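-- pv_equiv track=rewrite | github.com/tezeladata/A-Pythonic-Adventure-for-the-Intrepid-Beginner | A Pythonic Adventure for the Intrepid beginner/chapter5/linear_feedback_shift_registers.py | feedback_shift_list
-- ===== SOURCE A (Python) =====
-- def feedback_shift(bits):
--     xor_result = (bits[1] + bits[2]) % 2
--     output = bits.pop()
--     bits.insert(0,xor_result)
--     return(bits,output)
--
-- def feedback_shift_list(bits_this):
--     bits_output = [bits_this.copy()]
--     random_output = []
--     bits_next = bits_this.copy()
--
--     while(len(bits_output) < 2**len(bits_this)):
--         bits_next,next = feedback_shift(bits_next)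
--         bits_output.append(bits_next.copy())
--         random_output.append(next)
--
--     return bits_output,random_output
-- ===== SOURCE B (Python) =====
-- def feedback_shift_list(bits_this):
--     n = len(bits_this)
--     steps = 2 ** n - 1
--     # flat recurrence stream: first n entries are the reversed seed,
--     # each later entry is (q[m-2] + q[m-3]) % 2
--     q = bits_this[::-1]
--     for m in range(n, n + steps):
--         q.append((q[m - 2] + q[m - 3]) % 2)
--     states = [q[t:t + n][::-1] for t in range(steps + 1)]
--     outputs = q[:steps]
--     return states, outputs
-- ===== Notes on version B (the rewrite author's own statement) =====
-- stated objective: alternative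
-- what changed: Instead of simulating the register step by step with pop/insert(0)/copy on a mutating state list, B generates one flat linear-recurrence stream (reversed seed followed by 2^n-1 bits with q[m]=(q[m-2]+q[m-3])%2) and reads every state off as a reversed length-n window of that stream and every output bit as the stream element leaving the window.
-- outside the precondition, e.g. on feedback_shift_list([1]): A raises IndexError, B raises IndexError; on feedback_shift_list([1, 0]): A raises IndexError, B returns ([[1, 0], [1, 1], [1, 1], [0, 1]], [0, 1, 1]); on feedback_shift_list([2]): A raises IndexError, B raises IndexError
import Mathlib
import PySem

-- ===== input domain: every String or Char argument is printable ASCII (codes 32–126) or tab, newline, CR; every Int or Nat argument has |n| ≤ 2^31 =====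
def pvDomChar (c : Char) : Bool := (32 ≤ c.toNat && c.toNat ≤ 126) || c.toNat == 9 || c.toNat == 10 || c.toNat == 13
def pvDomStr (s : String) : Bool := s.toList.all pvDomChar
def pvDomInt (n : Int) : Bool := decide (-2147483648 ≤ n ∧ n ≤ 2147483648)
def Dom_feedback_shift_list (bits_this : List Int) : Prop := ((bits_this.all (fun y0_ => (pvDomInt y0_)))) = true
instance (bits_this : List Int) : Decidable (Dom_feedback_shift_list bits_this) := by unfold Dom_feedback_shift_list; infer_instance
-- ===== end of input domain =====

-- B replaces A's per-step pop/insert/copy state shuffling by one flat linear-recurrence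
-- stream over which states are read off as reversed windows (alternative decomposition).


-- ===== PORT A =====
-- feedback_shift: xor = (bits[1]+bits[2]) % 2; output = bits.pop(); bits.insert(0, xor).
-- bits[1]/bits[2] use pyGetD (total form); Pre_ guarantees the indices are in range
-- (in Python they raise IndexError exactly on the inputs Pre_ excludes).
def pvFeedbackShift (bits : List Int) : List Int × Int :=
  let xor_result := PySem.Int.mod (PySem.List.pyGetD bits 1 0 + PySem.List.pyGetD bits 2 0) 2
  match PySem.List.pop? bits with
  | some (output, rest) => (PySem.List.insert rest 0 xor_result, output)
  | none => ([], 0)  -- unreachable under Pre_ (bits is nonempty there)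
-- the while loop: each iteration appends one state, so it runs exactly 2^n - 1 times
def pvFsLoop : Nat → List Int → List (List Int) → List Int → List (List Int) × List Int
  | 0, _, bits_output, random_output => (bits_output, random_output)
  | f + 1, bits_next, bits_output, random_output =>
      let r := pvFeedbackShift bits_next
      pvFsLoop f r.1 (bits_output ++ [r.1]) (random_output ++ [r.2])
def feedback_shift_list (bits_this : List Int) : List (List Int) × List Int :=
  pvFsLoop (2 ^ bits_this.length - 1) bits_this [bits_this] []

-- ===== PORT B =====
-- q.append((q[m-2] + q[m-3]) % 2), `steps` times; m is the current length (an Int, as in Source B,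
-- so pyGetD reproduces Python's negative-index behaviour outside Pre_ as well)
def pvGenQ : Nat → List Int → List Int
  | 0, q => q
  | f + 1, q =>
      let m : Int := q.length
      pvGenQ f (q ++ [PySem.Int.mod (PySem.List.pyGetD q (m - 2) 0 + PySem.List.pyGetD q (m - 3) 0) 2])
def feedback_shift_list_alt (bits_this : List Int) : List (List Int) × List Int :=
  let n := bits_this.length
  let steps := 2 ^ n - 1
  let q := pvGenQ steps bits_this.reverse        -- bits_this[::-1]
  -- q[t:t+n][::-1] and q[:steps]; bounds are nonnegative Nats, so the slices are drop/take
  -- (PySem.List.slice_natCast / slice_to_natCast)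
  let states := (List.range (steps + 1)).map (fun t => ((q.drop t).take n).reverse)
  (states, q.take steps)

-- ===== PRECONDITION & SPEC =====
-- Pre_ excludes exactly the inputs where A raises IndexError: for len 1 the read bits[1]
-- raises, for len 2 the read bits[2] raises (for len 0 the loop body never runs).
def Pre_feedback_shift_list (bits_this : List Int) : Prop :=
  bits_this = [] ∨ 3 ≤ bits_this.length
instance (bits_this : List Int) : Decidable (Pre_feedback_shift_list bits_this) := by
  unfold Pre_feedback_shift_list; infer_instance
def pvWitness_feedback_shift_list : List Int := [1, 0, 1]
def Spec_feedback_shift_list (bits_this : List Int) (out : List (List Int) × List Int) : Prop := out = feedback_shift_list_alt bits_this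
instance (bits_this : List Int) (out : List (List Int) × List Int) : Decidable (Spec_feedback_shift_list bits_this out) := by unfold Spec_feedback_shift_list; infer_instance

-- ===== CLAIM (what is proved, stated in full; the proofs are below) =====
def Claim_equal_feedback_shift_list : Prop := ∀ (bits_this : List Int), Dom_feedback_shift_list bits_this → Pre_feedback_shift_list bits_this → Spec_feedback_shift_list bits_this (feedback_shift_list bits_this)

-- ===== LEMMAS AND PROOFS =====

-- the recurrence stream as a function: qf bits m = m-th element of the flat sequence
-- (for 3 ≤ bits.length; the `max … 3` only serves termination)
def pvQf (bits : List Int) (m : Nat) : Int :=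
  if m < max bits.length 3 then bits.reverse.getD m 0
  else PySem.Int.mod (pvQf bits (m - 2) + pvQf bits (m - 3)) 2
termination_by m
decreasing_by all_goals omega

-- ascending window of the stream
def pvW (bits : List Int) (k n : Nat) : List Int :=
  (List.range n).map (fun i => pvQf bits (k + i))

theorem pvW_succ_left (bits : List Int) (k n : Nat) :
    pvW bits k (n + 1) = pvQf bits k :: pvW bits (k + 1) n := by
  simp only [pvW, List.range_succ_eq_map, List.map_cons, List.map_map]
  congr 1
  apply List.map_congr_left
  intro i _
  simp only [Function.comp_apply]
  congr 1
  omega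

theorem pvW_succ_right (bits : List Int) (k n : Nat) :
    pvW bits k (n + 1) = pvW bits k n ++ [pvQf bits (k + n)] := by
  simp [pvW, List.range_succ]

theorem pvW_getElem (bits : List Int) (k n i : Nat) (h : i < n) :
    (pvW bits k n)[i]'(by simp [pvW]; omega) = pvQf bits (k + i) := by
  simp [pvW]

theorem pvQf_rec (bits : List Int) (m : Nat) (hn : 3 ≤ bits.length) (hm : bits.length ≤ m) :
    pvQf bits m = PySem.Int.mod (pvQf bits (m - 2) + pvQf bits (m - 3)) 2 := by
  rw [pvQf]
  have : ¬ m < max bits.length 3 := by omega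
  simp [this]

theorem pvQf_lt (bits : List Int) (m : Nat) (h : m < bits.length) :
    pvQf bits m = bits.reverse.getD m 0 := by
  rw [pvQf]
  have : m < max bits.length 3 := by omega
  simp [this]

-- the initial window is the reversed seed
theorem pvW_zero (bits : List Int) : pvW bits 0 bits.length = bits.reverse := by
  apply List.ext_getElem
  · simp [pvW]
  · intro i h1 h2
    have hi : i < bits.length := by simpa [pvW] using h1
    rw [pvW_getElem bits 0 bits.length i hi, Nat.zero_add, pvQf_lt bits i hi]
    simp [List.getD_eq_getElem?_getD, List.getElem?_eq_getElem h2]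

theorem pvW_map (bits : List Int) (n : Nat) :
    pvW bits 0 n = (List.range n).map (pvQf bits) := by
  apply List.map_congr_left
  intro i _
  rw [Nat.zero_add]

-- one A-step on a reversed window
theorem pvStep (bits : List Int) (k : Nat) (hn : 3 ≤ bits.length) :
    pvFeedbackShift (pvW bits k bits.length).reverse
      = ((pvW bits (k + 1) bits.length).reverse, pvQf bits k) := by
  obtain ⟨n', hsn⟩ : ∃ n', bits.length = n' + 1 := ⟨bits.length - 1, by omega⟩
  have hn' : 2 ≤ n' := by omega
  rw [hsn]
  have hW : (pvW bits k (n' + 1)).length = n' + 1 := by simp [pvW]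
  have hS : (pvW bits k (n' + 1)).reverse.length = n' + 1 := by simp [hW]
  have hdec : (pvW bits k (n' + 1)).reverse
      = (pvW bits (k + 1) n').reverse ++ [pvQf bits k] := by
    rw [pvW_succ_left]; simp
  unfold pvFeedbackShift
  have hpop : PySem.List.pop? (pvW bits k (n' + 1)).reverse
      = some (pvQf bits k, (pvW bits (k + 1) n').reverse) := by
    rw [hdec, PySem.List.pop?_last]
  have h1 : PySem.List.pyGetD (pvW bits k (n' + 1)).reverse 1 0
      = pvQf bits (k + (n' - 1)) := by
    rw [PySem.List.pyGetD_ofNat']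
    have hl : 1 < (pvW bits k (n' + 1)).reverse.length := by omega
    rw [List.getD_eq_getElem?_getD, List.getElem?_eq_getElem hl]
    rw [List.getElem_reverse]
    simp only [hW]
    rw [pvW_getElem bits k (n' + 1) (n' + 1 - 1 - 1) (by omega)]
    simp only [Option.getD_some]
    congr 1
  have h2 : PySem.List.pyGetD (pvW bits k (n' + 1)).reverse 2 0
      = pvQf bits (k + (n' - 2)) := by
    rw [PySem.List.pyGetD_ofNat']
    have hl : 2 < (pvW bits k (n' + 1)).reverse.length := by omega
    rw [List.getD_eq_getElem?_getD, List.getElem?_eq_getElem hl]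
    rw [List.getElem_reverse]
    simp only [hW]
    rw [pvW_getElem bits k (n' + 1) (n' + 1 - 1 - 2) (by omega)]
    simp only [Option.getD_some]
    congr 1
  simp only [h1, h2, hpop, PySem.List.insert_zero]
  refine Prod.ext ?_ rfl
  show _ = (pvW bits (k + 1) (n' + 1)).reverse
  rw [pvW_succ_right]
  simp only [List.reverse_append, List.reverse_singleton, List.singleton_append]
  congr 1
  rw [pvQf_rec bits (k + 1 + n') hn (by omega)]
  congr 2 <;> · congr 1; omega

-- the sequences of states / outputs the A-loop produces, as plain recursions
def pvStates (bits : List Int) : Nat → Nat → List (List Int)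
  | 0, _ => []
  | f + 1, k => (pvW bits k bits.length).reverse :: pvStates bits f (k + 1)

def pvOuts (bits : List Int) : Nat → Nat → List Int
  | 0, _ => []
  | f + 1, k => pvQf bits k :: pvOuts bits f (k + 1)

theorem pvLoop_eq (bits : List Int) (hn : 3 ≤ bits.length) :
    ∀ (f k : Nat) (bo : List (List Int)) (ro : List Int),
      pvFsLoop f (pvW bits k bits.length).reverse bo ro
        = (bo ++ pvStates bits f (k + 1), ro ++ pvOuts bits f k) := by
  intro f
  induction f with
  | zero => intro k bo ro; simp [pvFsLoop, pvStates, pvOuts]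
  | succ f ih =>
      intro k bo ro
      show pvFsLoop (f + 1) _ _ _ = _
      unfold pvFsLoop
      rw [pvStep bits k hn]
      rw [ih (k + 1)]
      simp [pvStates, pvOuts]

theorem pvStates_eq (bits : List Int) :
    ∀ (f k : Nat), pvStates bits f k
      = (List.range f).map (fun j => (pvW bits (k + j) bits.length).reverse) := by
  intro f
  induction f with
  | zero => intro k; simp [pvStates]
  | succ f ih =>
      intro k
      show (pvW bits k bits.length).reverse :: pvStates bits f (k + 1) = _
      rw [List.range_succ_eq_map, List.map_cons, List.map_map, ih (k + 1)]
      congr 1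
      apply List.map_congr_left
      intro j _
      simp only [Function.comp_apply]
      congr 2
      omega

theorem pvOuts_eq (bits : List Int) :
    ∀ (f k : Nat), pvOuts bits f k = (List.range f).map (fun j => pvQf bits (k + j)) := by
  intro f
  induction f with
  | zero => intro k; simp [pvOuts]
  | succ f ih =>
      intro k
      show pvQf bits k :: pvOuts bits f (k + 1) = _
      rw [List.range_succ_eq_map, List.map_cons, List.map_map, ih (k + 1)]
      congr 1
      apply List.map_congr_left
      intro j _
      simp only [Function.comp_apply]
      congr 1
      omega

-- the B stream equals the prefix of qf
theorem pvGenQ_eq (bits : List Int) (hn : 3 ≤ bits.length) :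
    ∀ (f k : Nat), bits.length ≤ k →
      pvGenQ f ((List.range k).map (pvQf bits))
        = (List.range (k + f)).map (pvQf bits) := by
  intro f
  induction f with
  | zero => intro k _; simp [pvGenQ]
  | succ f ih =>
      intro k hk
      show pvGenQ (f + 1) _ = _
      unfold pvGenQ
      have hcast : (((List.range k).map (pvQf bits)).length : Int) = (k : Int) := by simp
      have e2 : PySem.List.pyGetD ((List.range k).map (pvQf bits))
          ((((List.range k).map (pvQf bits)).length : Int) - 2) 0 = pvQf bits (k - 2) := by
        rw [hcast]
        have h2 : (k : Int) - 2 = ((k - 2 : Nat) : Int) := by omega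
        rw [h2, PySem.List.pyGetD_natCast]
        rw [List.getD_eq_getElem?_getD, List.getElem?_map, List.getElem?_range (by omega : k - 2 < k)]
        rfl
      have e3 : PySem.List.pyGetD ((List.range k).map (pvQf bits))
          ((((List.range k).map (pvQf bits)).length : Int) - 3) 0 = pvQf bits (k - 3) := by
        rw [hcast]
        have h3 : (k : Int) - 3 = ((k - 3 : Nat) : Int) := by omega
        rw [h3, PySem.List.pyGetD_natCast]
        rw [List.getD_eq_getElem?_getD, List.getElem?_map, List.getElem?_range (by omega : k - 3 < k)]
        rfl
      simp only [e2, e3]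
      have hq : PySem.Int.mod (pvQf bits (k - 2) + pvQf bits (k - 3)) 2 = pvQf bits k := by
        rw [pvQf_rec bits k hn (by omega)]
      rw [hq]
      have happ : (List.range k).map (pvQf bits) ++ [pvQf bits k]
          = (List.range (k + 1)).map (pvQf bits) := by
        simp [List.range_succ]
      rw [happ, ih (k + 1) (by omega)]
      have harith : k + 1 + f = k + (f + 1) := by omega
      rw [harith]

-- windows of the materialised stream are pvW
theorem pvWindow_eq (bits : List Int) (N t : Nat) (h : t + bits.length ≤ N) :
    (((List.range N).map (pvQf bits)).drop t).take bits.length = pvW bits t bits.length := by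
  apply List.ext_getElem
  · simp [pvW]; omega
  · intro i h1 h2
    have hi : i < bits.length := by simpa [pvW] using h2
    rw [List.getElem_take, List.getElem_drop, List.getElem_map, List.getElem_range]
    rw [pvW_getElem bits t bits.length i hi]

-- ===== VERDICT (by name: the statement is the Claim_ definition above) =====
theorem feedback_shift_list_spec : Claim_equal_feedback_shift_list := by
  intro bits _ hpre
  unfold Spec_feedback_shift_list
  rcases hpre with rfl | hn
  · decide
  · have hb0 : bits = (pvW bits 0 bits.length).reverse := by rw [pvW_zero]; simp
    have hA := pvLoop_eq bits hn (2 ^ bits.length - 1) 0 [bits] []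
    rw [← hb0] at hA
    have hrev : bits.reverse = (List.range bits.length).map (pvQf bits) := by
      rw [← pvW_zero, pvW_map]
    have hQ : pvGenQ (2 ^ bits.length - 1) bits.reverse
        = (List.range (bits.length + (2 ^ bits.length - 1))).map (pvQf bits) := by
      rw [hrev]; exact pvGenQ_eq bits hn _ _ (le_refl _)
    show feedback_shift_list bits = feedback_shift_list_alt bits
    unfold feedback_shift_list feedback_shift_list_alt
    rw [hA]
    set n := bits.length
    set steps := 2 ^ n - 1 with hsteps
    show ([bits] ++ pvStates bits steps (0 + 1), [] ++ pvOuts bits steps 0)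
        = ((List.range (steps + 1)).map
            (fun t => (((pvGenQ steps bits.reverse).drop t).take n).reverse),
           (pvGenQ steps bits.reverse).take steps)
    rw [hQ]
    refine Prod.ext ?_ ?_
    · -- states
      show bits :: pvStates bits steps (0 + 1)
          = (List.range (steps + 1)).map
              (fun t => ((((List.range (n + steps)).map (pvQf bits)).drop t).take n).reverse)
      rw [pvStates_eq, List.range_succ_eq_map, List.map_cons, List.map_map]
      congr 1
      · rw [pvWindow_eq bits (n + steps) 0 (by omega)]
        exact hb0
      · apply List.map_congr_left
        intro j hj
        have hjlt : j < steps := List.mem_range.mp hj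
        simp only [Function.comp_apply]
        rw [pvWindow_eq bits (n + steps) (j + 1) (by omega)]
        congr 2
        omega
    · -- outputs
      show pvOuts bits steps 0 = ((List.range (n + steps)).map (pvQf bits)).take steps
      rw [pvOuts_eq, ← List.map_take, List.take_range]
      have hmin : min steps (n + steps) = steps := by omega
      rw [hmin]
      apply List.map_congr_left
      intro j _
      rw [Nat.zero_add]
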